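-- pv_equiv track=rewrite | github.com/daniel-reich/ubiquitous-fiesta | hZ4HzhboCJ5dDiNve_7.py | special_reverse_string
-- ===== SOURCE A (Python) =====
-- def special_reverse_string(txt):
--   v = [i for i in txt if i != ' '][::-1]
--   s, j = '', 0
--   for i in txt:
--     if i == ' ':
--       s = s + ' '
--     else:
--       if i.isupper():
--         s = s + v[j].upper()
--       elif i.islower():
--         s = s + v[j].lower()
--       else:
--         s = s + v[j].lower()
--       j = j + 1
--   return s
-- ===== SOURCE B (Python) =====
-- def special_reverse_string(txt):
--   # Stream the source characters backwards instead of building a reversed filtered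
--   # list and indexing it: peel the next non-space char off the reversed remainder.
--   out = []
--   rest = txt[::-1]
--   for o in txt:
--     if o == ' ':
--       out.append(' ')
--     else:
--       rest = rest.lstrip(' ')
--       c, rest = rest[0], rest[1:]
--       out.append(c.upper() if o.isupper() else c.lower())
--   return ''.join(out)
-- ===== Notes on version B (the rewrite author's own statement) =====
-- stated objective: alternative
-- what changed: B never builds the reversed filtered list or keeps an index: it streams the reversed source, peeling the next non-space char (lstrip + head) off the remainder at each non-space position.
import Mathlib
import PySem

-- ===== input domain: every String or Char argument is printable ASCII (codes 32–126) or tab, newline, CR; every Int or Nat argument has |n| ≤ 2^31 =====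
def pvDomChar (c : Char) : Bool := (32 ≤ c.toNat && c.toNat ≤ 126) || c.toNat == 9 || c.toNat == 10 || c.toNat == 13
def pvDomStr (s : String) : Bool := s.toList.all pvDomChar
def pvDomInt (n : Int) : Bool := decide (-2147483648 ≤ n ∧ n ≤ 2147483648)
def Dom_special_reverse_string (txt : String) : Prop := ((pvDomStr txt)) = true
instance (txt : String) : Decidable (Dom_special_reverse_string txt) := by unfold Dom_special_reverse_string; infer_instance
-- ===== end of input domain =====

-- B streams the source backwards (lstrip + head on the reversed remainder) instead of
-- building a reversed filtered list and indexing it with a counter; objective: alternative.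

-- ===== PORT A =====
-- string concatenation is ported over List Char (exact); j always indexes v in range,
-- so the .getD default is never used (Python's v[j] never raises here).
def special_reverse_string (txt : String) : String :=
  let v := (txt.toList.filter (fun i => i ≠ ' ')).reverse
  let st := txt.toList.foldl (fun (st : List Char × Int) i =>
    if i = ' ' then (st.1 ++ [' '], st.2)
    else
      let c := (PySem.List.pyGet? v st.2).getD ' '
      if PySem.Chars.isupper i then (st.1 ++ [PySem.Chars.upperChar c], st.2 + 1)
      else if PySem.Chars.islower i then (st.1 ++ [PySem.Chars.lowerChar c], st.2 + 1)
      else (st.1 ++ [PySem.Chars.lowerChar c], st.2 + 1)) ([], 0)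
  String.ofList st.1

-- ===== PORT B =====
-- the [] branch is unreachable in Python (as many non-space chars remain in `rest`
-- as non-space positions remain in the text); Python would raise there.
def pvAltGo : List Char → List Char → List Char
  | [], _ => []
  | o :: os, rest =>
    if o = ' ' then ' ' :: pvAltGo os rest
    else
      match rest.dropWhile (· == ' ') with
      | [] => []
      | c :: r =>
        (if PySem.Chars.isupper o then PySem.Chars.upperChar c else PySem.Chars.lowerChar c)
          :: pvAltGo os r

def special_reverse_string_alt (txt : String) : String :=
  String.ofList (pvAltGo txt.toList txt.toList.reverse)

-- ===== PRECONDITION & SPEC =====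
def Spec_special_reverse_string (txt : String) (out : String) : Prop := out = special_reverse_string_alt txt
instance (txt : String) (out : String) : Decidable (Spec_special_reverse_string txt out) := by unfold Spec_special_reverse_string; infer_instance

-- ===== CLAIM (what is proved, stated in full; the proofs are below) =====
def Claim_equal_special_reverse_string : Prop := ∀ (txt : String), Dom_special_reverse_string txt → Spec_special_reverse_string txt (special_reverse_string txt)

-- ===== LEMMAS AND PROOFS =====

def pvConv (o c : Char) : Char :=
  if PySem.Chars.isupper o then PySem.Chars.upperChar c else PySem.Chars.lowerChar c

-- common reference: walk the text, consuming the supply w at non-space positions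
def pvMerge : List Char → List Char → List Char
  | [], _ => []
  | o :: os, w =>
    if o = ' ' then ' ' :: pvMerge os w
    else
      match w with
      | [] => []
      | c :: r => pvConv o c :: pvMerge os r

theorem pvFilter_dropWhile (l : List Char) :
    l.filter (fun c => c ≠ ' ') =
      (match l.dropWhile (· == ' ') with
       | [] => ([] : List Char)
       | c :: r => c :: r.filter (fun c => c ≠ ' ')) := by
  induction l with
  | nil => simp
  | cons a l ih =>
    by_cases h : a = ' '
    · subst h; simpa using ih
    · simp [h]

theorem pvAltGo_eq_merge (os : List Char) : ∀ rest : List Char,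
    pvAltGo os rest = pvMerge os (rest.filter (fun c => c ≠ ' ')) := by
  induction os with
  | nil => intro rest; simp [pvAltGo, pvMerge]
  | cons o os ih =>
    intro rest
    by_cases h : o = ' '
    · simp [pvAltGo, pvMerge, h, ih]
    · rw [pvFilter_dropWhile rest]
      cases hd : rest.dropWhile (· == ' ') with
      | nil => simp [pvAltGo, pvMerge, hd, h]
      | cons c r => simp [pvAltGo, pvMerge, hd, h, pvConv, ih]

theorem pvA_loop (os : List Char) : ∀ (v acc : List Char) (n : Nat),
    n + (os.filter (fun c => c ≠ ' ')).length ≤ v.length →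
    os.foldl (fun (st : List Char × Int) i =>
      if i = ' ' then (st.1 ++ [' '], st.2)
      else
        let c := (PySem.List.pyGet? v st.2).getD ' '
        if PySem.Chars.isupper i then (st.1 ++ [PySem.Chars.upperChar c], st.2 + 1)
        else if PySem.Chars.islower i then (st.1 ++ [PySem.Chars.lowerChar c], st.2 + 1)
        else (st.1 ++ [PySem.Chars.lowerChar c], st.2 + 1)) (acc, (n : Int))
    = (acc ++ pvMerge os (v.drop n), ((n + (os.filter (fun c => c ≠ ' ')).length : Nat) : Int)) := by
  induction os with
  | nil => intro v acc n h; simp [pvMerge]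
  | cons o os ih =>
    intro v acc n h
    by_cases ho : o = ' '
    · subst ho
      rw [List.foldl_cons, if_pos rfl]
      rw [ih v (acc ++ [' ']) n (by simpa using h)]
      simp [pvMerge]
    · have hcnt : ((o :: os).filter (fun c => c ≠ ' ')).length
          = (os.filter (fun c => c ≠ ' ')).length + 1 := by
        simp [ho]
      have hn : n < v.length := by omega
      have hget : (PySem.List.pyGet? v ((n : Nat) : Int)).getD ' ' = v[n] := by
        rw [PySem.List.pyGet?_natCast]
        simp [List.getElem?_eq_getElem hn]
      have hdrop : v.drop n = v[n] :: v.drop (n + 1) := List.drop_eq_getElem_cons hn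
      simp only [List.foldl_cons, if_neg ho, hget]
      have hstep : ∀ b : List Char,
          (if PySem.Chars.isupper o then (b ++ [PySem.Chars.upperChar v[n]], ((n : Nat) : Int) + 1)
           else if PySem.Chars.islower o then (b ++ [PySem.Chars.lowerChar v[n]], ((n : Nat) : Int) + 1)
           else (b ++ [PySem.Chars.lowerChar v[n]], ((n : Nat) : Int) + 1))
          = (b ++ [pvConv o v[n]], (((n + 1 : Nat)) : Int)) := by
        intro b
        unfold pvConv
        push_cast
        split_ifs <;> simp
      rw [hstep]
      rw [ih v (acc ++ [pvConv o v[n]]) (n + 1) (by omega)]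
      rw [hdrop]
      simp [pvMerge, ho]
      omega

-- ===== VERDICT (by name: the statement is the Claim_ definition above) =====
theorem special_reverse_string_spec : Claim_equal_special_reverse_string := by
  intro txt _
  unfold Spec_special_reverse_string special_reverse_string special_reverse_string_alt
  have hlen : (0 : Nat) + (txt.toList.filter (fun c => c ≠ ' ')).length
      ≤ ((txt.toList.filter (fun i => i ≠ ' ')).reverse).length := by simp
  have := pvA_loop txt.toList ((txt.toList.filter (fun i => i ≠ ' ')).reverse) [] 0 hlen
  rw [pvAltGo_eq_merge]
  rw [show ((0:Nat):Int) = (0:Int) by simp] at this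
  simp only [this, List.drop_zero, List.nil_append]
  rw [List.filter_reverse]
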